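-- pv_equiv track=rewrite | github.com/Amorkriz/__python__ | __function__.py | getC_RGB
-- ===== SOURCE A (Python) =====
-- def getC_RGB(R,G,B):
--     '''
--     这个函数可以通过输入RGB的值获得该RGB值的表块是多少（C[0]到C[7]中的一个）
--     '''
--     count = [0 for _ in range(8)]
--     if R==0:
--         i=0
--     else:
--         i = (R//10)+1
--     if G==0:
--         j=0
--     else:
--         j = (G//10)+1
--     if B==0:
--         k=0
--     else:
--         k = (B//10)+1
--     if ((k%2==0)&(j%2==0)&(i%2==0)):
--         count[0] += 1
--     if ((k%2==0)&(j%2==0)&(i%2==1)):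
--         count[1] += 1
--     if ((k%2==0)&(j%2==1)&(i%2==0)):
--         count[2] += 1
--     if ((k%2==0)&(j%2==1)&(i%2==1)):
--         count[3] += 1
--     if ((k%2==1)&(j%2==0)&(i%2==0)):
--         count[4] += 1
--     if ((k%2==1)&(j%2==0)&(i%2==1)):
--         count[5] += 1
--     if ((k%2==1)&(j%2==1)&(i%2==0)):
--         count[6] += 1
--     if ((k%2==1)&(j%2==1)&(i%2==1)):
--         count[7] += 1
--     C = count.index(1)
--     return C
-- ===== SOURCE B (Python) =====
-- def getC_RGB(R, G, B):
--     # Closed-form bucket: binary code from the three parities, same ordering as A's table.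
--     i = 0 if R == 0 else (R // 10) + 1
--     j = 0 if G == 0 else (G // 10) + 1
--     k = 0 if B == 0 else (B // 10) + 1
--     return int(i % 2 + 2 * (j % 2) + 4 * (k % 2))
-- ===== Notes on version B (the rewrite author's own statement) =====
-- stated objective: simpler
-- what changed: Replaces the 8-slot count table, eight parity conditionals and the count.index(1) scan with a direct closed-form bucket number i%2 + 2*(j%2) + 4*(k%2).
import Mathlib
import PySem

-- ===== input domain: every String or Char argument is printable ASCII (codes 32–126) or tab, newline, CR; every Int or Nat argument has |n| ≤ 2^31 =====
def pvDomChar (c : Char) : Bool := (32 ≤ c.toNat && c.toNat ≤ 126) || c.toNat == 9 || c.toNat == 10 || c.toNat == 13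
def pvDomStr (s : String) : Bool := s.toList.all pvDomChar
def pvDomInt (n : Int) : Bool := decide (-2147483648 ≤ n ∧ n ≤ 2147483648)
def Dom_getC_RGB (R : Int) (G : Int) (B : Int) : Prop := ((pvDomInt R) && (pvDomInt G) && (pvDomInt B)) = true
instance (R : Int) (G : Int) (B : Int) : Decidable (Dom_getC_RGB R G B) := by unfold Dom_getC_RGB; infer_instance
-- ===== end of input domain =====

-- B replaces A's 8-slot count table, eight conditionals and count.index(1) scan by the closed-form bucket i%2 + 2*(j%2) + 4*(k%2) (simpler).


-- ===== PORT A =====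
def getC_RGB (R : Int) (G : Int) (B : Int) : Int :=
  let count : List Int := (List.range 8).map (fun _ => 0)
  let i : Int := if R == 0 then 0 else PySem.Int.floordiv R 10 + 1
  let j : Int := if G == 0 then 0 else PySem.Int.floordiv G 10 + 1
  let k : Int := if B == 0 then 0 else PySem.Int.floordiv B 10 + 1
  let count := if (PySem.Int.mod k 2 == 0) && (PySem.Int.mod j 2 == 0) && (PySem.Int.mod i 2 == 0) then count.set 0 (count.getD 0 0 + 1) else count
  let count := if (PySem.Int.mod k 2 == 0) && (PySem.Int.mod j 2 == 0) && (PySem.Int.mod i 2 == 1) then count.set 1 (count.getD 1 0 + 1) else count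
  let count := if (PySem.Int.mod k 2 == 0) && (PySem.Int.mod j 2 == 1) && (PySem.Int.mod i 2 == 0) then count.set 2 (count.getD 2 0 + 1) else count
  let count := if (PySem.Int.mod k 2 == 0) && (PySem.Int.mod j 2 == 1) && (PySem.Int.mod i 2 == 1) then count.set 3 (count.getD 3 0 + 1) else count
  let count := if (PySem.Int.mod k 2 == 1) && (PySem.Int.mod j 2 == 0) && (PySem.Int.mod i 2 == 0) then count.set 4 (count.getD 4 0 + 1) else count
  let count := if (PySem.Int.mod k 2 == 1) && (PySem.Int.mod j 2 == 0) && (PySem.Int.mod i 2 == 1) then count.set 5 (count.getD 5 0 + 1) else count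
  let count := if (PySem.Int.mod k 2 == 1) && (PySem.Int.mod j 2 == 1) && (PySem.Int.mod i 2 == 0) then count.set 6 (count.getD 6 0 + 1) else count
  let count := if (PySem.Int.mod k 2 == 1) && (PySem.Int.mod j 2 == 1) && (PySem.Int.mod i 2 == 1) then count.set 7 (count.getD 7 0 + 1) else count
  -- count.index(1): exactly one slot holds 1 (the parity cases are exhaustive and exclusive), so index? is always some
  (PySem.List.index? count 1).getD 0

-- ===== PORT B =====
def getC_RGB_alt (R : Int) (G : Int) (B : Int) : Int :=
  let i : Int := if R == 0 then 0 else PySem.Int.floordiv R 10 + 1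
  let j : Int := if G == 0 then 0 else PySem.Int.floordiv G 10 + 1
  let k : Int := if B == 0 then 0 else PySem.Int.floordiv B 10 + 1
  PySem.Int.mod i 2 + 2 * PySem.Int.mod j 2 + 4 * PySem.Int.mod k 2

-- ===== PRECONDITION & SPEC =====
def Spec_getC_RGB (R : Int) (G : Int) (B : Int) (out : Int) : Prop := out = getC_RGB_alt R G B
instance (R : Int) (G : Int) (B : Int) (out : Int) : Decidable (Spec_getC_RGB R G B out) := by unfold Spec_getC_RGB; infer_instance

-- ===== CLAIM (what is proved, stated in full; the proofs are below) =====
def Claim_equal_getC_RGB : Prop := ∀ (R : Int) (G : Int) (B : Int), Dom_getC_RGB R G B → Spec_getC_RGB R G B (getC_RGB R G B)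

-- ===== LEMMAS AND PROOFS =====
-- Proof-only abbreviation of A's body after i,j,k are fixed (used to generalize over i j k).
def getC_RGB_parityA (i j k : Int) : Int :=
  let count : List Int := (List.range 8).map (fun _ => 0)
  let count := if (PySem.Int.mod k 2 == 0) && (PySem.Int.mod j 2 == 0) && (PySem.Int.mod i 2 == 0) then count.set 0 (count.getD 0 0 + 1) else count
  let count := if (PySem.Int.mod k 2 == 0) && (PySem.Int.mod j 2 == 0) && (PySem.Int.mod i 2 == 1) then count.set 1 (count.getD 1 0 + 1) else count
  let count := if (PySem.Int.mod k 2 == 0) && (PySem.Int.mod j 2 == 1) && (PySem.Int.mod i 2 == 0) then count.set 2 (count.getD 2 0 + 1) else count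
  let count := if (PySem.Int.mod k 2 == 0) && (PySem.Int.mod j 2 == 1) && (PySem.Int.mod i 2 == 1) then count.set 3 (count.getD 3 0 + 1) else count
  let count := if (PySem.Int.mod k 2 == 1) && (PySem.Int.mod j 2 == 0) && (PySem.Int.mod i 2 == 0) then count.set 4 (count.getD 4 0 + 1) else count
  let count := if (PySem.Int.mod k 2 == 1) && (PySem.Int.mod j 2 == 0) && (PySem.Int.mod i 2 == 1) then count.set 5 (count.getD 5 0 + 1) else count
  let count := if (PySem.Int.mod k 2 == 1) && (PySem.Int.mod j 2 == 1) && (PySem.Int.mod i 2 == 0) then count.set 6 (count.getD 6 0 + 1) else count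
  let count := if (PySem.Int.mod k 2 == 1) && (PySem.Int.mod j 2 == 1) && (PySem.Int.mod i 2 == 1) then count.set 7 (count.getD 7 0 + 1) else count
  (PySem.List.index? count 1).getD 0

-- ===== VERDICT (by name: the statement is the Claim_ definition above) =====
-- For any i j k, A's table-and-scan equals B's closed form, by the 8 parity cases.
theorem parity_cases (i j k : Int) :
    getC_RGB_parityA i j k = PySem.Int.mod i 2 + 2 * PySem.Int.mod j 2 + 4 * PySem.Int.mod k 2 := by
  have hi := Int.emod_two_eq i
  have hj := Int.emod_two_eq j
  have hk := Int.emod_two_eq k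
  rcases hi with hi | hi <;> rcases hj with hj | hj <;> rcases hk with hk | hk <;>
    simp [getC_RGB_parityA, PySem.Int.mod_eq_emod_of_pos, hi, hj, hk,
      Int.dvd_iff_emod_eq_zero, PySem.List.index?] <;> decide

theorem getC_RGB_spec : Claim_equal_getC_RGB := by
  intro R G B _
  show getC_RGB R G B = getC_RGB_alt R G B
  unfold getC_RGB getC_RGB_alt
  exact parity_cases _ _ _
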